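-- pv_equiv track=rewrite | github.com/toxicmender/legal-grag | prompting/chain_of_thought.py | _parse_reasoning_chain
-- ===== SOURCE A (Python) =====
-- from typing import List, Dict, Any, Optional
--
-- def _parse_reasoning_chain(text: str) -> List[Dict[str, Any]]:
--     """Parse a reasoning chain from text (simplified)."""
--     steps = []
--     current_step = None
--
--     for line in text.split('\n'):
--         if line.strip().startswith('Step') or line.strip().startswith('step'):
--             if current_step:
--                 steps.append(current_step)
--             current_step = {'reasoning': line}
--         elif current_step:
--             current_step['reasoning'] += '\n' + line
--
--     if current_step:
--         steps.append(current_step)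
--
--     return steps
-- ===== SOURCE B (Python) =====
-- def _parse_reasoning_chain(text):
--     """Parse a reasoning chain from text (block-scanning re-implementation)."""
--     def is_header(l):
--         return l.strip().startswith(('Step', 'step'))
--
--     lines = text.split('\n')
--     groups = []
--     i, n = 0, len(lines)
--     while i < n:
--         if not is_header(lines[i]):
--             i += 1
--             continue
--         j = i + 1
--         while j < n and not is_header(lines[j]):
--             j += 1
--         groups.append(lines[i:j])
--         i = j
--     return [{'reasoning': '\n'.join(g)} for g in groups]
-- ===== Notes on version B (the rewrite author's own statement) =====
-- stated objective: alternative
-- what changed: A is a per-line state machine that grows the current step's reasoning string with += on every line; B scans for header lines, slices each block of lines up to the next header and joins it once.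
import Mathlib
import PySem

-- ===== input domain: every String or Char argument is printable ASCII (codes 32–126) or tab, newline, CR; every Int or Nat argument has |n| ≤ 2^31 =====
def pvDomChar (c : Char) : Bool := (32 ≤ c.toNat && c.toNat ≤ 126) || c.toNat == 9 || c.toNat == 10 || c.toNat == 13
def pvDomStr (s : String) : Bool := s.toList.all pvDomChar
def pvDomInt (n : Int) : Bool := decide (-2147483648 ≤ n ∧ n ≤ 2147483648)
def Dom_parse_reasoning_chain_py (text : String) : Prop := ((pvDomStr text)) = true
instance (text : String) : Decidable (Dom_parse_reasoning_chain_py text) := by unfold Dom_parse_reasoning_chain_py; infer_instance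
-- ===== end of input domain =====

-- B re-implements A's per-line state machine as block scanning (find each header, slice
-- the lines up to the next header, join once); same return value, objective: alternative.

-- ===== PORT A =====
-- shared header test: A's "line.strip().startswith('Step') or line.strip().startswith('step')",
-- identically B's "l.strip().startswith(('Step', 'step'))"
def pvIsHeader (line : String) : Bool :=
  PySem.Str.startswith (PySem.Str.strip line) "Step" || PySem.Str.startswith (PySem.Str.strip line) "step"

-- loop body of A: state = (steps, current_step); current_step['reasoning'] += '\n' + line
-- is ported as reading the (always present) key and overwriting it in place.
def pvAStep (st : List (List (String × String)) × Option (PySem.Dict String String)) (line : String) :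
    List (List (String × String)) × Option (PySem.Dict String String) :=
  if pvIsHeader line then
    (match st.2 with
     | some d => st.1 ++ [d.items]
     | none => st.1,
     some (PySem.Dict.mk [("reasoning", line)]))
  else
    match st.2 with
    | some d => (st.1, some (d.insert "reasoning" (d.getD "reasoning" "" ++ "\n" ++ line)))
    | none => st

-- 'text.split('\n')'; the separator is the nonempty "\n", so split? is never none
def parse_reasoning_chain_py (text : String) : List (List (String × String)) :=
  let lines := (PySem.Str.split? text "\n").getD []
  let st := lines.foldl pvAStep ([], none)
  match st.2 with
  | some d => st.1 ++ [d.items]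
  | none => st.1

-- ===== PORT B =====
-- the two while loops of B: skip a non-header line; at a header take the slice up to the
-- next header (takeWhile = the inner scan for j) and continue at that point (dropWhile)
def pvGroups : List String → List (List String)
  | [] => []
  | l :: ls =>
    if pvIsHeader l then
      (l :: ls.takeWhile (fun x => !pvIsHeader x)) :: pvGroups (ls.dropWhile (fun x => !pvIsHeader x))
    else
      pvGroups ls
termination_by ls => ls.length
decreasing_by
  · exact Nat.lt_succ_of_le (List.length_dropWhile_le _ _)
  · exact Nat.lt_succ_self _

def parse_reasoning_chain_py_alt (text : String) : List (List (String × String)) :=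
  (pvGroups ((PySem.Str.split? text "\n").getD [])).map
    (fun g => [("reasoning", PySem.Str.join "\n" g)])

-- ===== PRECONDITION & SPEC =====
def Spec_parse_reasoning_chain_py (text : String) (out : List (List (String × String))) : Prop := out = parse_reasoning_chain_py_alt text
instance (text : String) (out : List (List (String × String))) : Decidable (Spec_parse_reasoning_chain_py text out) := by unfold Spec_parse_reasoning_chain_py; infer_instance

-- ===== CLAIM (what is proved, stated in full; the proofs are below) =====
def Claim_equal_parse_reasoning_chain_py : Prop := ∀ (text : String), Dom_parse_reasoning_chain_py text → Spec_parse_reasoning_chain_py text (parse_reasoning_chain_py text)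

-- ===== LEMMAS AND PROOFS =====

-- finalize A's loop state (the trailing 'if current_step: steps.append(current_step)')
def pvFin (st : List (List (String × String)) × Option (PySem.Dict String String)) :
    List (List (String × String)) :=
  match st.2 with
  | some d => st.1 ++ [d.items]
  | none => st.1

-- the suffix '\n'+x1+'\n'+x2+… that A's += loop appends after the header line
def pvPj : List String → String
  | [] => ""
  | x :: xs => "\n" ++ x ++ pvPj xs

lemma pvJoin_cons : ∀ (g : List String) (l : String),
    PySem.Str.join "\n" (l :: g) = l ++ pvPj g
  | [], l => by
    simp [PySem.Str.join, PySem.Chars.join_singleton, pvPj, String.ofList_toList]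
  | x :: xs, l => by
    have ih := pvJoin_cons xs x
    simp only [PySem.Str.join, List.map_cons, PySem.Chars.join_cons_cons, pvPj] at ih ⊢
    rw [String.ofList_append, String.ofList_append, String.ofList_toList, String.ofList_toList,
      ih, String.append_assoc, String.append_assoc]

lemma pvInsert_single (s v : String) :
    (PySem.Dict.mk [("reasoning", s)]).insert "reasoning" v = PySem.Dict.mk [("reasoning", v)] := by
  simp [pysem, PySem.Dict.insert]

lemma pvGetD_single (s : String) :
    (PySem.Dict.mk [("reasoning", s)]).getD "reasoning" "" = s := by
  simp [pysem, PySem.Dict.getD, PySem.Dict.get?]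

lemma pvGroups_cons (l : String) (ls : List String) :
    pvGroups (l :: ls) =
      if pvIsHeader l then
        (l :: ls.takeWhile (fun x => !pvIsHeader x)) :: pvGroups (ls.dropWhile (fun x => !pvIsHeader x))
      else
        pvGroups ls := by
  rw [pvGroups.eq_def]

lemma pvA_some : ∀ (ls : List String) (steps : List (List (String × String))) (s : String),
    pvFin (ls.foldl pvAStep (steps, some (PySem.Dict.mk [("reasoning", s)]))) =
      steps ++ [[("reasoning", s ++ pvPj (ls.takeWhile (fun x => !pvIsHeader x)))]]
        ++ (pvGroups (ls.dropWhile (fun x => !pvIsHeader x))).map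
            (fun g => [("reasoning", PySem.Str.join "\n" g)])
  | [], steps, s => by
    simp [pvFin, pvGroups, pvPj, String.append_empty]
  | l :: ls, steps, s => by
    by_cases h : pvIsHeader l
    · have ih := pvA_some ls (steps ++ [[("reasoning", s)]]) l
      rw [List.foldl_cons]
      rw [show pvAStep (steps, some (PySem.Dict.mk [("reasoning", s)])) l
            = (steps ++ [[("reasoning", s)]], some (PySem.Dict.mk [("reasoning", l)])) by
          simp [pvAStep, h]]
      rw [ih, List.takeWhile_cons, List.dropWhile_cons]
      simp only [h, Bool.not_true, Bool.false_eq_true, if_false, pvGroups_cons,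
        pvPj, String.append_empty]
      simp [List.append_assoc]
      exact (pvJoin_cons _ _).symm
    · have ih := pvA_some ls steps (s ++ "\n" ++ l)
      rw [List.foldl_cons]
      rw [show pvAStep (steps, some (PySem.Dict.mk [("reasoning", s)])) l
            = (steps, some (PySem.Dict.mk [("reasoning", s ++ "\n" ++ l)])) by
          simp [pvAStep, h, pvGetD_single, pvInsert_single]]
      rw [ih, List.takeWhile_cons, List.dropWhile_cons]
      simp only [h, Bool.not_false, if_true, pvPj]
      simp [String.append_assoc]

lemma pvA_none : ∀ (ls : List String) (steps : List (List (String × String))),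
    pvFin (ls.foldl pvAStep (steps, none)) =
      steps ++ (pvGroups ls).map (fun g => [("reasoning", PySem.Str.join "\n" g)])
  | [], steps => by simp [pvFin, pvGroups]
  | l :: ls, steps => by
    by_cases h : pvIsHeader l
    · have ih := pvA_some ls steps l
      rw [List.foldl_cons]
      rw [show pvAStep (steps, none) l
            = (steps, some (PySem.Dict.mk [("reasoning", l)])) by
          simp [pvAStep, h]]
      rw [ih, pvGroups_cons, if_pos h]
      simp [pvJoin_cons]
    · have ih := pvA_none ls steps
      rw [List.foldl_cons]
      rw [show pvAStep (steps, none) l = (steps, none) by simp [pvAStep, h]]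
      rw [ih, pvGroups_cons, if_neg h]

-- ===== VERDICT (by name: the statement is the Claim_ definition above) =====
theorem parse_reasoning_chain_py_spec : Claim_equal_parse_reasoning_chain_py := by
  intro text _
  unfold Spec_parse_reasoning_chain_py parse_reasoning_chain_py parse_reasoning_chain_py_alt
  exact pvA_none ((PySem.Str.split? text "\n").getD []) []
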